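-- pv_equiv track=rewrite | github.com/BohdanPodoliak/uwu | Lb_9.py | func
-- ===== SOURCE A (Python) =====
-- def func( y, j):
--     mas = []
--     for i in range(len(y)):
--         mas.append(y[i]-y[i-1])
--     mas.pop(0)
--     if j==1:
--         return mas
--     else:
--         j -=1
--         return func(mas,j)
-- ===== SOURCE B (Python) =====
-- def func(y, j):
--     cur = list(y)
--     while True:
--         prev = cur.pop(0)
--         out = []
--         for v in cur:
--             out.append(v - prev)
--             prev = v
--         if j == 1:
--             return out
--         j -= 1
--         cur = out
-- ===== Notes on version B (the rewrite author's own statement) =====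
-- stated objective: alternative
-- what changed: Replaces the tail recursion that rebuilds each pass as a wraparound-polluted index comprehension and then pops its head with an iterative while-loop whose pass pops the head as a running 'previous' value and accumulates pairwise differences in one sweep.
import Mathlib
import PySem

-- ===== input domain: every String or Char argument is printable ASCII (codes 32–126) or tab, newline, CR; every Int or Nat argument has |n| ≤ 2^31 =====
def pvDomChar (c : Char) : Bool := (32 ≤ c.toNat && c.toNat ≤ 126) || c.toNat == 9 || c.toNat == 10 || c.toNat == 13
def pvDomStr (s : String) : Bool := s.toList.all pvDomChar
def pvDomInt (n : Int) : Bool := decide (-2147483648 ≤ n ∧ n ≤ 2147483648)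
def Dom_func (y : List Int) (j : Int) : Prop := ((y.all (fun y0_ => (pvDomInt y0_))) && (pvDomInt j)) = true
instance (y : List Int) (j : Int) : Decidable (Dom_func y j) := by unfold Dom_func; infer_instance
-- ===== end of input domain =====

-- B replaces A's tail recursion (wraparound comprehension + pop of its head each pass) by an
-- iterative loop whose pass pops the head as a running previous value and accumulates pairwise
-- differences in one sweep; both raise IndexError on exactly the same inputs (j < 1 or j > len(y)).

-- ===== PORT A =====
-- 'for i in range(len(y)): mas.append(y[i]-y[i-1])' then 'mas.pop(0)';
-- Python raises IndexError when the pop fails (empty list): the port returns [] there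
-- (B's port does the same at the same states, so equivalence still holds there).
def func (y : List Int) (j : Int) : List Int :=
  match h : PySem.List.pop? ((List.range y.length).map
    (fun (i : Nat) => PySem.List.pyGetD y (i : Int) 0 - PySem.List.pyGetD y ((i : Int) - 1) 0)) 0 with
  | none => []          -- Python: IndexError
  | some (_, mas') => if j == 1 then mas' else func mas' (j - 1)
termination_by y.length
decreasing_by
  have hl := PySem.List.length_of_pop?_eq_some _ h
  simp at hl
  omega

-- ===== PORT B =====
-- length of one B-pass ('for v in cur: out.append(v - prev); prev = v'), needed for termination
lemma diffSweep_length : ∀ (rest : List Int) (prev : Int) (acc : List Int),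
    ((rest.foldl (fun (s : List Int × Int) v => (s.1 ++ [v - s.2], v)) (acc, prev)).1).length
      = acc.length + rest.length := by
  intro rest
  induction rest with
  | nil => intro prev acc; simp
  | cons v vs ih =>
    intro prev acc
    simp only [List.foldl_cons, ih]
    simp
    omega

-- 'while True: prev = cur.pop(0); out = []; for v in cur: out.append(v - prev); prev = v; …'
def func_alt (y : List Int) (j : Int) : List Int :=
  match h : PySem.List.pop? y 0 with
  | none => []          -- Python: IndexError from cur.pop(0)
  | some (prev, rest) =>
    let out := (rest.foldl (fun (s : List Int × Int) v => (s.1 ++ [v - s.2], v)) ([], prev)).1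
    if j == 1 then out else func_alt out (j - 1)
termination_by y.length
decreasing_by
  have hl := PySem.List.length_of_pop?_eq_some _ h
  have := diffSweep_length rest prev []
  simp_all
  omega

-- ===== PRECONDITION & SPEC =====
-- Pre_func excludes exactly the inputs on which Python A raises (IndexError from the pop
-- once the sequence is exhausted, reached whenever j < 1 or j > len(y)); B raises there too.
def Pre_func (y : List Int) (j : Int) : Prop := 1 ≤ j ∧ j ≤ (y.length : Int)
instance (y : List Int) (j : Int) : Decidable (Pre_func y j) := by unfold Pre_func; infer_instance

def pvWitness_func : List Int × Int := ([1, 3, 6, 10], 2)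

def Spec_func (y : List Int) (j : Int) (out : List Int) : Prop := out = func_alt y j
instance (y : List Int) (j : Int) (out : List Int) : Decidable (Spec_func y j out) := by unfold Spec_func; infer_instance

-- ===== CLAIM (what is proved, stated in full; the proofs are below) =====
def Claim_equal_func : Prop := ∀ (y : List Int) (j : Int), Dom_func y j → Pre_func y j → Spec_func y j (func y j)

-- ===== LEMMAS AND PROOFS =====

-- the pairwise-difference pass both programs compute (proof-side characterisation)
def pdiff (y : List Int) : List Int := (y.zip y.tail).map (fun p => p.2 - p.1)

-- A's pass: the wraparound comprehension minus its head is exactly the pairwise differences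
lemma mas_tail_eq_pdiff (y : List Int) :
    ((List.range y.length).map
      (fun (i : Nat) => PySem.List.pyGetD y (i : Int) 0 - PySem.List.pyGetD y ((i : Int) - 1) 0)).tail
      = pdiff y := by
  apply List.ext_getElem
  · simp [pdiff]
  · intro k hk _
    simp only [List.getElem_tail, List.getElem_map, List.getElem_range]
    have hk' : k + 1 < y.length := by
      simp at hk; omega
    have h1 : ((k : Int) + 1) - 1 = (k : Int) := by ring
    have hc : ((k + 1 : Nat) : Int) = (k : Int) + 1 := by push_cast; ring
    rw [hc, h1]
    have e1 : PySem.List.pyGetD y ((k : Int) + 1) 0 = y[k + 1] := by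
      rw [show ((k : Int) + 1) = ((k + 1 : Nat) : Int) by push_cast; ring,
        PySem.List.pyGetD_natCast]
      simp [List.getD_eq_getElem?_getD, List.getElem?_eq_getElem hk']
    have e2 : PySem.List.pyGetD y (k : Int) 0 = y[k] := by
      rw [PySem.List.pyGetD_natCast]
      simp [List.getD_eq_getElem?_getD, List.getElem?_eq_getElem (by omega : k < y.length)]
    rw [e1, e2]
    simp [pdiff]

-- B's pass: the running-previous sweep is exactly the pairwise differences
lemma diffSweep_eq_pdiff : ∀ (rest : List Int) (prev : Int) (acc : List Int),
    ((rest.foldl (fun (s : List Int × Int) v => (s.1 ++ [v - s.2], v)) (acc, prev)).1)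
      = acc ++ pdiff (prev :: rest) := by
  intro rest
  induction rest with
  | nil => intro prev acc; simp [pdiff]
  | cons v vs ih =>
    intro prev acc
    simp only [List.foldl_cons, ih]
    simp [pdiff]

lemma func_step (y : List Int) (j : Int) (hy : y ≠ []) :
    func y j = if j == 1 then pdiff y else func (pdiff y) (j - 1) := by
  have hne : ((List.range y.length).map
      (fun (i : Nat) => PySem.List.pyGetD y (i : Int) 0 - PySem.List.pyGetD y ((i : Int) - 1) 0)) ≠ [] := by
    simp [hy]
  obtain ⟨a, l, hl⟩ := List.exists_cons_of_ne_nil hne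
  have hd : l = pdiff y := by
    have h2 := mas_tail_eq_pdiff y
    rw [hl] at h2
    simpa using h2
  conv_lhs => unfold func
  split
  · rename_i h
    rw [hl, PySem.List.pop?_zero_cons] at h
    simp at h
  · rename_i fst mas' h
    rw [hl, PySem.List.pop?_zero_cons] at h
    simp only [Option.some.injEq, Prod.mk.injEq] at h
    rw [← h.2, hd]

lemma func_alt_step (prev : Int) (rest : List Int) (j : Int) :
    func_alt (prev :: rest) j =
      if j == 1 then pdiff (prev :: rest) else func_alt (pdiff (prev :: rest)) (j - 1) := by
  conv_lhs => unfold func_alt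
  split
  · rename_i h
    rw [PySem.List.pop?_zero_cons] at h
    simp at h
  · rename_i p r h
    rw [PySem.List.pop?_zero_cons] at h
    simp only [Option.some.injEq, Prod.mk.injEq] at h
    rw [← h.1, ← h.2]
    simp only [diffSweep_eq_pdiff, List.nil_append]

lemma length_pdiff (y : List Int) : (pdiff y).length = y.length - 1 := by
  simp [pdiff]

lemma func_eq_func_alt (n : Nat) : ∀ (y : List Int), y.length ≤ n → ∀ (j : Int),
    func y j = func_alt y j := by
  induction n with
  | zero =>
    intro y hy j
    have : y = [] := List.length_eq_zero_iff.mp (by omega)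
    subst this
    rw [func, func_alt]
    simp [PySem.List.pop?, PySem.List.pyIdx?]
  | succ n ih =>
    intro y hy j
    cases y with
    | nil =>
      rw [func, func_alt]
      simp [PySem.List.pop?, PySem.List.pyIdx?]
    | cons a l =>
      rw [func_step (a :: l) j (by simp), func_alt_step a l j]
      by_cases hj : j == 1
      · rw [if_pos hj, if_pos hj]
      · rw [if_neg hj, if_neg hj]
        exact ih (pdiff (a :: l)) (by rw [length_pdiff]; simp at hy ⊢; omega) (j - 1)

-- ===== VERDICT (by name: the statement is the Claim_ definition above) =====
theorem func_spec : Claim_equal_func := by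
  intro y j _ _
  exact func_eq_func_alt y.length y le_rfl j
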